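-- pv_equiv track=rewrite | github.com/Abder-rrazzak/customer-support-chatbot | src/chatbot/intent_classifier.py | _are_related_intents
-- ===== SOURCE A (Python) =====
-- def _are_related_intents(intent1: str, intent2: str) -> bool:
--     """
--     Vérifie si deux intentions sont liées.
--
--     Args:
--         intent1: Première intention
--         intent2: Deuxième intention
--
--     Returns:
--         bool: True si les intentions sont liées
--     """
--     related_groups = [
--         {"order_status", "shipping_info", "delivery_update"},
--         {"refund_request", "return_product", "exchange_product"},
--         {"account_help", "login_issue", "password_reset"},
--         {"technical_support", "bug_report", "feature_request"},
--     ]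
--
--     for group in related_groups:
--         if intent1 in group and intent2 in group:
--             return True
--
--     return False
-- ===== SOURCE B (Python) =====
-- _GROUPS = [
--     ["order_status", "shipping_info", "delivery_update"],
--     ["refund_request", "return_product", "exchange_product"],
--     ["account_help", "login_issue", "password_reset"],
--     ["technical_support", "bug_report", "feature_request"],
-- ]
--
-- _INTENT_GROUP = {intent: i for i, group in enumerate(_GROUPS) for intent in group}
--
--
-- def _are_related_intents(intent1: str, intent2: str) -> bool:
--     g = _INTENT_GROUP.get(intent1)
--     return g is not None and _INTENT_GROUP.get(intent2) == g
-- ===== Notes on version B (the rewrite author's own statement) =====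
-- stated objective: idiomatic
-- what changed: Replaced the loop over four groups with a flat intent->group-index dict built once; the check becomes two lookups (guarding the both-absent case) instead of scanning groups.
import Mathlib
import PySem

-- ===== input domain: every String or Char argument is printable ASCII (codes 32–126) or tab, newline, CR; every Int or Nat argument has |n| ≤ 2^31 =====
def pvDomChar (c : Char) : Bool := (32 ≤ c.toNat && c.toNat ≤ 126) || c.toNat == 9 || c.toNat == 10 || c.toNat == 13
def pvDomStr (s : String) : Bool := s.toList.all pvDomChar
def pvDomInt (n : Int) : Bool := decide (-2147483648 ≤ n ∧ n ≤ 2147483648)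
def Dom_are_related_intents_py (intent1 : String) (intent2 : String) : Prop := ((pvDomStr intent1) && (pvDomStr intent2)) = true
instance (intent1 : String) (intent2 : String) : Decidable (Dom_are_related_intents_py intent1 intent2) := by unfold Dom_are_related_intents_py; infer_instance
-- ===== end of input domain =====

-- B replaces A's loop over the four groups by one flat intent -> group-index dict built once;
-- the check becomes two lookups with a guard against both intents being absent (idiomatic, no scan per call).

-- ===== PORT A =====
def pvGroupsA : List (PySem.Set String) :=
  [PySem.Set.ofList ["order_status", "shipping_info", "delivery_update"],
   PySem.Set.ofList ["refund_request", "return_product", "exchange_product"],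
   PySem.Set.ofList ["account_help", "login_issue", "password_reset"],
   PySem.Set.ofList ["technical_support", "bug_report", "feature_request"]]

-- A's for-loop: return True on the first group containing both intents, else False (= any)
def are_related_intents_py (intent1 : String) (intent2 : String) : Bool :=
  pvGroupsA.any (fun g => PySem.Set.contains g intent1 && PySem.Set.contains g intent2)

-- ===== PORT B =====
def pvGroupsB : List (List String) :=
  [["order_status", "shipping_info", "delivery_update"],
   ["refund_request", "return_product", "exchange_product"],
   ["account_help", "login_issue", "password_reset"],
   ["technical_support", "bug_report", "feature_request"]]

-- B's dict comprehension {intent: i for i, group in enumerate(_GROUPS) for intent in group}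
def pvIntentGroup : PySem.Dict String Int :=
  (PySem.List.enumerate pvGroupsB).foldl
    (fun d p => p.2.foldl (fun d intent => d.insert intent p.1) d) PySem.Dict.empty

-- g = dict.get(intent1); return g is not None and dict.get(intent2) == g
def are_related_intents_py_alt (intent1 : String) (intent2 : String) : Bool :=
  match PySem.Dict.get? pvIntentGroup intent1 with
  | none => false
  | some g => PySem.Dict.get? pvIntentGroup intent2 == some g

-- ===== PRECONDITION & SPEC =====
def Spec_are_related_intents_py (intent1 : String) (intent2 : String) (out : Bool) : Prop := out = are_related_intents_py_alt intent1 intent2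
instance (intent1 : String) (intent2 : String) (out : Bool) : Decidable (Spec_are_related_intents_py intent1 intent2 out) := by unfold Spec_are_related_intents_py; infer_instance

-- ===== CLAIM (what is proved, stated in full; the proofs are below) =====
def Claim_equal_are_related_intents_py : Prop := ∀ (intent1 : String) (intent2 : String), Dom_are_related_intents_py intent1 intent2 → Spec_are_related_intents_py intent1 intent2 (are_related_intents_py intent1 intent2)

-- ===== LEMMAS AND PROOFS =====

-- the group index of a string, as an if-chain (proof-side characterisation of both ports)
def pvIdx (s : String) : Option Int :=
  if "order_status" == s then some 0 else if "shipping_info" == s then some 0 else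
  if "delivery_update" == s then some 0 else
  if "refund_request" == s then some 1 else if "return_product" == s then some 1 else
  if "exchange_product" == s then some 1 else
  if "account_help" == s then some 2 else if "login_issue" == s then some 2 else
  if "password_reset" == s then some 2 else
  if "technical_support" == s then some 3 else if "bug_report" == s then some 3 else
  if "feature_request" == s then some 3 else none

theorem pv_gdef : pvIntentGroup = PySem.Dict.mk
  [("order_status",0),("shipping_info",0),("delivery_update",0),
   ("refund_request",1),("return_product",1),("exchange_product",1),
   ("account_help",2),("login_issue",2),("password_reset",2),
   ("technical_support",3),("bug_report",3),("feature_request",3)] := by decide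

theorem pv_adef : pvGroupsA =
  [["order_status", "shipping_info", "delivery_update"],
   ["refund_request", "return_product", "exchange_product"],
   ["account_help", "login_issue", "password_reset"],
   ["technical_support", "bug_report", "feature_request"]] := by decide

theorem pv_lookup_eq (s : String) : PySem.Dict.get? pvIntentGroup s = pvIdx s := by
  rw [pv_gdef]; simp only [PySem.Dict.get?_mk_cons, pvIdx]; rfl

theorem pv_idx_cases (s : String) :
    pvIdx s = none ∨ pvIdx s = some 0 ∨ pvIdx s = some 1 ∨ pvIdx s = some 2 ∨ pvIdx s = some 3 := by
  unfold pvIdx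
  cases h1 : (("order_status" : String) == s) with
  | true => rw [if_pos rfl]; exact Or.inr (Or.inl rfl)
  | false =>
  rw [if_neg (by simp)]
  cases h2 : (("shipping_info" : String) == s) with
  | true => rw [if_pos rfl]; exact Or.inr (Or.inl rfl)
  | false =>
  rw [if_neg (by simp)]
  cases h3 : (("delivery_update" : String) == s) with
  | true => rw [if_pos rfl]; exact Or.inr (Or.inl rfl)
  | false =>
  rw [if_neg (by simp)]
  cases h4 : (("refund_request" : String) == s) with
  | true => rw [if_pos rfl]; exact Or.inr (Or.inr (Or.inl rfl))
  | false =>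
  rw [if_neg (by simp)]
  cases h5 : (("return_product" : String) == s) with
  | true => rw [if_pos rfl]; exact Or.inr (Or.inr (Or.inl rfl))
  | false =>
  rw [if_neg (by simp)]
  cases h6 : (("exchange_product" : String) == s) with
  | true => rw [if_pos rfl]; exact Or.inr (Or.inr (Or.inl rfl))
  | false =>
  rw [if_neg (by simp)]
  cases h7 : (("account_help" : String) == s) with
  | true => rw [if_pos rfl]; exact Or.inr (Or.inr (Or.inr (Or.inl rfl)))
  | false =>
  rw [if_neg (by simp)]
  cases h8 : (("login_issue" : String) == s) with
  | true => rw [if_pos rfl]; exact Or.inr (Or.inr (Or.inr (Or.inl rfl)))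
  | false =>
  rw [if_neg (by simp)]
  cases h9 : (("password_reset" : String) == s) with
  | true => rw [if_pos rfl]; exact Or.inr (Or.inr (Or.inr (Or.inl rfl)))
  | false =>
  rw [if_neg (by simp)]
  cases h10 : (("technical_support" : String) == s) with
  | true => rw [if_pos rfl]; exact Or.inr (Or.inr (Or.inr (Or.inr rfl)))
  | false =>
  rw [if_neg (by simp)]
  cases h11 : (("bug_report" : String) == s) with
  | true => rw [if_pos rfl]; exact Or.inr (Or.inr (Or.inr (Or.inr rfl)))
  | false =>
  rw [if_neg (by simp)]
  cases h12 : (("feature_request" : String) == s) with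
  | true => rw [if_pos rfl]; exact Or.inr (Or.inr (Or.inr (Or.inr rfl)))
  | false =>
  rw [if_neg (by simp)]
  exact Or.inl rfl

theorem pv_c0 (s : String) :
    ((["order_status", "shipping_info", "delivery_update"] : List String).contains s)
      = (pvIdx s == some 0) := by
  unfold pvIdx
  cases h1 : (("order_status" : String) == s) with
  | true => simp only [beq_iff_eq] at h1; subst h1; decide
  | false =>
  rw [if_neg (by simp)]
  cases h2 : (("shipping_info" : String) == s) with
  | true => simp only [beq_iff_eq] at h2; subst h2; decide
  | false =>
  rw [if_neg (by simp)]
  cases h3 : (("delivery_update" : String) == s) with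
  | true => simp only [beq_iff_eq] at h3; subst h3; decide
  | false =>
  rw [if_neg (by simp)]
  cases h4 : (("refund_request" : String) == s) with
  | true => simp only [beq_iff_eq] at h4; subst h4; decide
  | false =>
  rw [if_neg (by simp)]
  cases h5 : (("return_product" : String) == s) with
  | true => simp only [beq_iff_eq] at h5; subst h5; decide
  | false =>
  rw [if_neg (by simp)]
  cases h6 : (("exchange_product" : String) == s) with
  | true => simp only [beq_iff_eq] at h6; subst h6; decide
  | false =>
  rw [if_neg (by simp)]
  cases h7 : (("account_help" : String) == s) with
  | true => simp only [beq_iff_eq] at h7; subst h7; decide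
  | false =>
  rw [if_neg (by simp)]
  cases h8 : (("login_issue" : String) == s) with
  | true => simp only [beq_iff_eq] at h8; subst h8; decide
  | false =>
  rw [if_neg (by simp)]
  cases h9 : (("password_reset" : String) == s) with
  | true => simp only [beq_iff_eq] at h9; subst h9; decide
  | false =>
  rw [if_neg (by simp)]
  cases h10 : (("technical_support" : String) == s) with
  | true => simp only [beq_iff_eq] at h10; subst h10; decide
  | false =>
  rw [if_neg (by simp)]
  cases h11 : (("bug_report" : String) == s) with
  | true => simp only [beq_iff_eq] at h11; subst h11; decide
  | false =>
  rw [if_neg (by simp)]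
  cases h12 : (("feature_request" : String) == s) with
  | true => simp only [beq_iff_eq] at h12; subst h12; decide
  | false =>
  rw [if_neg (by simp)]
  simp only [beq_eq_false_iff_ne, ne_eq] at h1 h2 h3 h4 h5 h6 h7 h8 h9 h10 h11 h12
  simp [Ne.symm h1, Ne.symm h2, Ne.symm h3]

theorem pv_c1 (s : String) :
    ((["refund_request", "return_product", "exchange_product"] : List String).contains s)
      = (pvIdx s == some 1) := by
  unfold pvIdx
  cases h1 : (("order_status" : String) == s) with
  | true => simp only [beq_iff_eq] at h1; subst h1; decide
  | false =>
  rw [if_neg (by simp)]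
  cases h2 : (("shipping_info" : String) == s) with
  | true => simp only [beq_iff_eq] at h2; subst h2; decide
  | false =>
  rw [if_neg (by simp)]
  cases h3 : (("delivery_update" : String) == s) with
  | true => simp only [beq_iff_eq] at h3; subst h3; decide
  | false =>
  rw [if_neg (by simp)]
  cases h4 : (("refund_request" : String) == s) with
  | true => simp only [beq_iff_eq] at h4; subst h4; decide
  | false =>
  rw [if_neg (by simp)]
  cases h5 : (("return_product" : String) == s) with
  | true => simp only [beq_iff_eq] at h5; subst h5; decide
  | false =>
  rw [if_neg (by simp)]
  cases h6 : (("exchange_product" : String) == s) with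
  | true => simp only [beq_iff_eq] at h6; subst h6; decide
  | false =>
  rw [if_neg (by simp)]
  cases h7 : (("account_help" : String) == s) with
  | true => simp only [beq_iff_eq] at h7; subst h7; decide
  | false =>
  rw [if_neg (by simp)]
  cases h8 : (("login_issue" : String) == s) with
  | true => simp only [beq_iff_eq] at h8; subst h8; decide
  | false =>
  rw [if_neg (by simp)]
  cases h9 : (("password_reset" : String) == s) with
  | true => simp only [beq_iff_eq] at h9; subst h9; decide
  | false =>
  rw [if_neg (by simp)]
  cases h10 : (("technical_support" : String) == s) with
  | true => simp only [beq_iff_eq] at h10; subst h10; decide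
  | false =>
  rw [if_neg (by simp)]
  cases h11 : (("bug_report" : String) == s) with
  | true => simp only [beq_iff_eq] at h11; subst h11; decide
  | false =>
  rw [if_neg (by simp)]
  cases h12 : (("feature_request" : String) == s) with
  | true => simp only [beq_iff_eq] at h12; subst h12; decide
  | false =>
  rw [if_neg (by simp)]
  simp only [beq_eq_false_iff_ne, ne_eq] at h1 h2 h3 h4 h5 h6 h7 h8 h9 h10 h11 h12
  simp [Ne.symm h4, Ne.symm h5, Ne.symm h6]

theorem pv_c2 (s : String) :
    ((["account_help", "login_issue", "password_reset"] : List String).contains s)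
      = (pvIdx s == some 2) := by
  unfold pvIdx
  cases h1 : (("order_status" : String) == s) with
  | true => simp only [beq_iff_eq] at h1; subst h1; decide
  | false =>
  rw [if_neg (by simp)]
  cases h2 : (("shipping_info" : String) == s) with
  | true => simp only [beq_iff_eq] at h2; subst h2; decide
  | false =>
  rw [if_neg (by simp)]
  cases h3 : (("delivery_update" : String) == s) with
  | true => simp only [beq_iff_eq] at h3; subst h3; decide
  | false =>
  rw [if_neg (by simp)]
  cases h4 : (("refund_request" : String) == s) with
  | true => simp only [beq_iff_eq] at h4; subst h4; decide
  | false =>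
  rw [if_neg (by simp)]
  cases h5 : (("return_product" : String) == s) with
  | true => simp only [beq_iff_eq] at h5; subst h5; decide
  | false =>
  rw [if_neg (by simp)]
  cases h6 : (("exchange_product" : String) == s) with
  | true => simp only [beq_iff_eq] at h6; subst h6; decide
  | false =>
  rw [if_neg (by simp)]
  cases h7 : (("account_help" : String) == s) with
  | true => simp only [beq_iff_eq] at h7; subst h7; decide
  | false =>
  rw [if_neg (by simp)]
  cases h8 : (("login_issue" : String) == s) with
  | true => simp only [beq_iff_eq] at h8; subst h8; decide
  | false =>
  rw [if_neg (by simp)]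
  cases h9 : (("password_reset" : String) == s) with
  | true => simp only [beq_iff_eq] at h9; subst h9; decide
  | false =>
  rw [if_neg (by simp)]
  cases h10 : (("technical_support" : String) == s) with
  | true => simp only [beq_iff_eq] at h10; subst h10; decide
  | false =>
  rw [if_neg (by simp)]
  cases h11 : (("bug_report" : String) == s) with
  | true => simp only [beq_iff_eq] at h11; subst h11; decide
  | false =>
  rw [if_neg (by simp)]
  cases h12 : (("feature_request" : String) == s) with
  | true => simp only [beq_iff_eq] at h12; subst h12; decide
  | false =>
  rw [if_neg (by simp)]
  simp only [beq_eq_false_iff_ne, ne_eq] at h1 h2 h3 h4 h5 h6 h7 h8 h9 h10 h11 h12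
  simp [Ne.symm h7, Ne.symm h8, Ne.symm h9]

theorem pv_c3 (s : String) :
    ((["technical_support", "bug_report", "feature_request"] : List String).contains s)
      = (pvIdx s == some 3) := by
  unfold pvIdx
  cases h1 : (("order_status" : String) == s) with
  | true => simp only [beq_iff_eq] at h1; subst h1; decide
  | false =>
  rw [if_neg (by simp)]
  cases h2 : (("shipping_info" : String) == s) with
  | true => simp only [beq_iff_eq] at h2; subst h2; decide
  | false =>
  rw [if_neg (by simp)]
  cases h3 : (("delivery_update" : String) == s) with
  | true => simp only [beq_iff_eq] at h3; subst h3; decide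
  | false =>
  rw [if_neg (by simp)]
  cases h4 : (("refund_request" : String) == s) with
  | true => simp only [beq_iff_eq] at h4; subst h4; decide
  | false =>
  rw [if_neg (by simp)]
  cases h5 : (("return_product" : String) == s) with
  | true => simp only [beq_iff_eq] at h5; subst h5; decide
  | false =>
  rw [if_neg (by simp)]
  cases h6 : (("exchange_product" : String) == s) with
  | true => simp only [beq_iff_eq] at h6; subst h6; decide
  | false =>
  rw [if_neg (by simp)]
  cases h7 : (("account_help" : String) == s) with
  | true => simp only [beq_iff_eq] at h7; subst h7; decide
  | false =>
  rw [if_neg (by simp)]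
  cases h8 : (("login_issue" : String) == s) with
  | true => simp only [beq_iff_eq] at h8; subst h8; decide
  | false =>
  rw [if_neg (by simp)]
  cases h9 : (("password_reset" : String) == s) with
  | true => simp only [beq_iff_eq] at h9; subst h9; decide
  | false =>
  rw [if_neg (by simp)]
  cases h10 : (("technical_support" : String) == s) with
  | true => simp only [beq_iff_eq] at h10; subst h10; decide
  | false =>
  rw [if_neg (by simp)]
  cases h11 : (("bug_report" : String) == s) with
  | true => simp only [beq_iff_eq] at h11; subst h11; decide
  | false =>
  rw [if_neg (by simp)]
  cases h12 : (("feature_request" : String) == s) with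
  | true => simp only [beq_iff_eq] at h12; subst h12; decide
  | false =>
  rw [if_neg (by simp)]
  simp only [beq_eq_false_iff_ne, ne_eq] at h1 h2 h3 h4 h5 h6 h7 h8 h9 h10 h11 h12
  simp [Ne.symm h10, Ne.symm h11, Ne.symm h12]

-- ===== VERDICT (by name: the statement is the Claim_ definition above) =====
theorem are_related_intents_py_spec : Claim_equal_are_related_intents_py := by
  intro i1 i2 _
  unfold Spec_are_related_intents_py are_related_intents_py are_related_intents_py_alt
  rw [pv_adef]
  simp only [List.any_cons, List.any_nil, PySem.Set.contains, pv_lookup_eq,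
    pv_c0, pv_c1, pv_c2, pv_c3]
  rcases pv_idx_cases i1 with h1 | h1 | h1 | h1 | h1 <;>
    rcases pv_idx_cases i2 with h2 | h2 | h2 | h2 | h2 <;>
    simp [h1, h2]
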